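-- pv_equiv track=rewrite | github.com/OrdinaryDev83/tack-ro-montreal | practical/theoric/eulerize_undirected.py | is_eulerian_cycle
-- ===== SOURCE A (Python) =====
-- def nedge(a, b):
--     return (a, b) if a < b else (b, a)
--
-- def is_eulerian_cycle(n, edges, cycle):
--     if len(edges) != len(cycle):
--         return False
--     if len(edges) == 0:
--         return True
--     eset = {}
--     for (a, b, w) in edges:
--         s = nedge(a, b)
--         if s in eset:
--             eset[s] += 1
--         else:
--             eset[s] = 1
--     for (a, b) in zip(cycle, cycle[1:]+cycle[0:1]):
--         s = nedge(a, b)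
--         if s in eset and eset[s] > 0:
--             eset[s] -= 1
--         else:
--             return False
--     for val in eset.values():
--         if val != 0:
--             return False
--     return True
-- ===== SOURCE B (Python) =====
-- def nedge(a, b):
--     return (a, b) if a < b else (b, a)
--
-- def is_eulerian_cycle(n, edges, cycle):
--     need = sorted(nedge(a, b) for (a, b, w) in edges)
--     walk = sorted(nedge(x, y) for x, y in zip(cycle, cycle[1:] + cycle[:1]))
--     return need == walk
-- ===== Notes on version B (the rewrite author's own statement) =====
-- stated objective: alternative
-- what changed: B sorts the normalized edge list and the normalized consecutive-cycle-pair list (with wraparound) and returns whether the two sorted lists are equal, replacing A's hash-counter build, consume-with-decrement loop with early exit, and final all-zero scan by a sort-and-compare; correct because two lists are equal as multisets iff their sorted forms coincide.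
import Mathlib
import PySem

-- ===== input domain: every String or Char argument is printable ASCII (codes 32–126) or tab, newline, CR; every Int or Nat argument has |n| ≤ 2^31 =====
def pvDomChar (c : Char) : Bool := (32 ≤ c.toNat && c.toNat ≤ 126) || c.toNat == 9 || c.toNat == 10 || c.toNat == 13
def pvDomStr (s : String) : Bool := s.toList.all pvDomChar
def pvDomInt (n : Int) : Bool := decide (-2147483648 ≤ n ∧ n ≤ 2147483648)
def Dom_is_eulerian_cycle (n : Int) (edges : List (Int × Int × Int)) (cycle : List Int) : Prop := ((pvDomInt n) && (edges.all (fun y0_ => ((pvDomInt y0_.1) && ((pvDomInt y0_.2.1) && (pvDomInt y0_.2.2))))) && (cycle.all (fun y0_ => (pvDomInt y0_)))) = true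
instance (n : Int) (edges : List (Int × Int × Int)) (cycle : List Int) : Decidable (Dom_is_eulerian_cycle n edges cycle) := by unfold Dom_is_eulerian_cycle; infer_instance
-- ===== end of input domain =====

-- B replaces A's hash-counter build + consume-with-decrement loop + all-zero scan by
-- sorting both normalized-pair lists and comparing them once (objective: alternative; not claimed faster).

-- ===== PORT A =====
def pvNedge (a b : Int) : Int × Int := if a < b then (a, b) else (b, a)

-- the second for-loop of A: consume each cycle edge from eset, early `return False` = none
def pvConsume (d : PySem.Dict (Int × Int) Int) : List (Int × Int) → Option (PySem.Dict (Int × Int) Int)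
  | [] => some d
  | p :: rest =>
    let s := pvNedge p.1 p.2
    if d.contains s && decide (d.getD s 0 > 0) then
      pvConsume (d.insert s (d.getD s 0 - 1)) rest
    else none

def is_eulerian_cycle (n : Int) (edges : List (Int × Int × Int)) (cycle : List Int) : Bool :=
  if edges.length ≠ cycle.length then false
  else if edges.length = 0 then true
  else
    let eset := edges.foldl (fun d t =>
      let s := pvNedge t.1 t.2.1
      if d.contains s then d.insert s (d.getD s 0 + 1) else d.insert s 1) PySem.Dict.empty
    match pvConsume eset (cycle.zip (PySem.List.slice cycle (some 1) none ++ PySem.List.slice cycle (some 0) (some 1))) with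
    | none => false
    | some d => d.values.all (fun v => v == 0)

-- ===== PORT B =====
def pvNedgeB (a b : Int) : Int × Int := if a < b then (a, b) else (b, a)

-- Python's `sorted` on a list of int pairs orders them lexicographically; the key
-- `toLex : Int × Int → Lex (Int × Int)` gives exactly that order, so this is exact.
def pvSortPairs (ps : List (Int × Int)) : List (Int × Int) :=
  PySem.List.sorted ps (fun p => toLex p) false

def is_eulerian_cycle_alt (n : Int) (edges : List (Int × Int × Int)) (cycle : List Int) : Bool :=
  let need := pvSortPairs (edges.map (fun t => pvNedgeB t.1 t.2.1))
  let walk := pvSortPairs ((cycle.zip (PySem.List.slice cycle (some 1) none ++ PySem.List.slice cycle (some 0) (some 1))).map (fun p => pvNedgeB p.1 p.2))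
  need == walk

-- ===== PRECONDITION & SPEC =====
def Spec_is_eulerian_cycle (n : Int) (edges : List (Int × Int × Int)) (cycle : List Int) (out : Bool) : Prop := out = is_eulerian_cycle_alt n edges cycle
instance (n : Int) (edges : List (Int × Int × Int)) (cycle : List Int) (out : Bool) : Decidable (Spec_is_eulerian_cycle n edges cycle out) := by unfold Spec_is_eulerian_cycle; infer_instance

-- ===== CLAIM (what is proved, stated in full; the proofs are below) =====
def Claim_equal_is_eulerian_cycle : Prop := ∀ (n : Int) (edges : List (Int × Int × Int)) (cycle : List Int), Dom_is_eulerian_cycle n edges cycle → Spec_is_eulerian_cycle n edges cycle (is_eulerian_cycle n edges cycle)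

-- ===== LEMMAS AND PROOFS =====

-- the list of normalized edges and the list of normalized consecutive cycle pairs
def pvEs (edges : List (Int × Int × Int)) : List (Int × Int) := edges.map (fun t => pvNedge t.1 t.2.1)
def pvCs (cycle : List Int) : List (Int × Int) :=
  (cycle.zip (PySem.List.slice cycle (some 1) none ++ PySem.List.slice cycle (some 0) (some 1))).map (fun p => pvNedge p.1 p.2)

lemma pvCs_length (cycle : List Int) : (pvCs cycle).length = cycle.length := by
  unfold pvCs
  rw [PySem.List.slice_from_one]
  have h1 : PySem.List.slice cycle (some 0) (some 1) = cycle.take 1 := by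
    simpa using PySem.List.slice_to_natCast (xs := cycle) (b := 1)
  rw [h1, List.length_map, List.length_zip, List.length_append, List.length_tail,
      List.length_take]
  omega

-- B = true iff the two normalized-pair lists are permutations of each other
lemma alt_iff (n : Int) (edges : List (Int × Int × Int)) (cycle : List Int) :
    is_eulerian_cycle_alt n edges cycle = true ↔ (pvEs edges).Perm (pvCs cycle) := by
  have hne : pvNedgeB = pvNedge := rfl
  unfold is_eulerian_cycle_alt
  rw [hne]
  rw [show (edges.map (fun t => pvNedge t.1 t.2.1)) = pvEs edges from rfl,
      show ((cycle.zip (PySem.List.slice cycle (some 1) none ++ PySem.List.slice cycle (some 0) (some 1))).map (fun p => pvNedge p.1 p.2)) = pvCs cycle from rfl]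
  rw [beq_iff_eq]
  unfold pvSortPairs
  constructor
  · intro h
    exact (PySem.List.sorted_perm (pvEs edges) (fun p => toLex p) false).symm.trans
      (h ▸ PySem.List.sorted_perm (pvCs cycle) (fun p => toLex p) false)
  · intro hp
    exact PySem.List.sorted_eq_sorted_of_perm (pvEs edges) (pvCs cycle) (fun p => toLex p)
      (fun a b h => h) hp

-- all values zero iff every lookup is zero (keys Nodup)
lemma values_all_zero_iff (d : PySem.Dict (Int × Int) Int) (hnd : d.keys.Nodup) :
    (d.values.all (fun v => v == 0) = true) ↔ ∀ k, d.getD k 0 = 0 := by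
  rw [PySem.Dict.values_eq_map_keys d hnd 0, List.all_map, List.all_eq_true]
  constructor
  · intro h k
    by_cases hk : k ∈ d.keys
    · simpa using h k hk
    · have hc : d.contains k = false := by
        cases hcc : d.contains k with
        | false => rfl
        | true => exact absurd ((PySem.Dict.contains_iff_mem_keys d k).1 hcc) hk
      exact PySem.Dict.getD_of_not_contains d 0 hc
  · intro h k _
    simpa using h k

-- the consume loop followed by the all-zero scan succeeds iff d's counts are exactly
-- the counts of the normalized pairs
lemma consume_iff (ps : List (Int × Int)) :
    ∀ (d : PySem.Dict (Int × Int) Int), d.keys.Nodup →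
    (((match pvConsume d ps with
       | none => false
       | some d' => d'.values.all (fun v => v == 0)) = true) ↔
      ∀ k, d.getD k 0 = ((ps.map (fun p => pvNedge p.1 p.2)).count k : Int)) := by
  induction ps with
  | nil =>
    intro d hnd
    simp only [pvConsume, List.map_nil, List.count_nil]
    exact (values_all_zero_iff d hnd).trans (by simp)
  | cons p rest ih =>
    intro d hnd
    simp only [pvConsume]
    set s := pvNedge p.1 p.2 with hs
    have hmapc : ∀ k : Int × Int,
        ((((p :: rest).map (fun q => pvNedge q.1 q.2)).count k : Int))
          = (((rest.map (fun q => pvNedge q.1 q.2)).count k : Int)) + (if k = s then 1 else 0) := by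
      intro k
      simp only [List.map_cons, ← hs, List.count_cons]
      by_cases hks : k = s
      · subst hks; simp
      · have hsk : ¬ (s = k) := fun h' => hks h'.symm
        simp [hks, hsk]
    by_cases hcond : (d.contains s && decide (d.getD s 0 > 0)) = true
    · rw [if_pos hcond]
      have hpos : 0 < d.getD s 0 := by
        rw [Bool.and_eq_true] at hcond
        exact of_decide_eq_true hcond.2
      rw [ih (d.insert s (d.getD s 0 - 1)) (PySem.Dict.nodup_keys_insert d s _ hnd)]
      constructor
      · intro h k
        have hk := h k
        rw [PySem.Dict.getD_insert] at hk
        rw [hmapc k]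
        by_cases hks : k = s
        · subst hks; rw [if_pos rfl] at hk ⊢; omega
        · rw [if_neg hks] at hk ⊢; omega
      · intro h k
        have hk := h k
        rw [hmapc k] at hk
        rw [PySem.Dict.getD_insert]
        by_cases hks : k = s
        · subst hks; rw [if_pos rfl] at hk ⊢; omega
        · rw [if_neg hks] at hk ⊢; omega
    · rw [if_neg hcond]
      refine iff_of_false (by simp) ?_
      intro h
      have hk := h s
      have hcnt : 0 < ((p :: rest).map (fun q => pvNedge q.1 q.2)).count s := by
        apply List.count_pos_iff.2
        exact List.mem_map.2 ⟨p, List.mem_cons_self .., hs.symm⟩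
      have hpos : 0 < d.getD s 0 := by rw [hk]; exact_mod_cast hcnt
      have hcontains : d.contains s = true := by
        cases hcc : d.contains s with
        | true => rfl
        | false =>
          rw [PySem.Dict.getD_of_not_contains d 0 hcc] at hpos
          omega
      apply hcond
      rw [hcontains]
      simp only [Bool.true_and, decide_eq_true_eq]
      exact hpos

-- A's counter-building loop is Dict.counter of the normalized edge list
lemma eset_eq_counter (edges : List (Int × Int × Int)) :
    (edges.foldl (fun d t =>
      let s := pvNedge t.1 t.2.1
      if d.contains s then d.insert s (d.getD s 0 + 1) else d.insert s 1) PySem.Dict.empty)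
    = PySem.Dict.counter (pvEs edges) := by
  have hfun : (fun (d : PySem.Dict (Int × Int) Int) (t : Int × Int × Int) =>
      let s := pvNedge t.1 t.2.1
      if d.contains s then d.insert s (d.getD s 0 + 1) else d.insert s 1)
      = fun d t => d.insert (pvNedge t.1 t.2.1) (d.getD (pvNedge t.1 t.2.1) 0 + 1) := by
    funext d t
    cases hc : d.contains (pvNedge t.1 t.2.1) with
    | true => simp only [hc, if_true]
    | false =>
      simp only [hc, Bool.false_eq_true, if_false,
        PySem.Dict.getD_of_not_contains d 0 hc]
      norm_num
  rw [hfun]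
  have hmap : edges.foldl
      (fun (d : PySem.Dict (Int × Int) Int) t => d.insert (pvNedge t.1 t.2.1) (d.getD (pvNedge t.1 t.2.1) 0 + 1))
      PySem.Dict.empty
      = (pvEs edges).foldl (fun d s => d.insert s (d.getD s 0 + 1)) PySem.Dict.empty :=
    (List.foldl_map (f := fun t : Int × Int × Int => pvNedge t.1 t.2.1)
      (g := fun (d : PySem.Dict (Int × Int) Int) s => d.insert s (d.getD s 0 + 1))
      (l := edges) (init := PySem.Dict.empty)).symm
  rw [hmap]
  exact PySem.Dict.foldl_insert_getD_add_one_eq_counter (pvEs edges)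

-- A = true iff the two normalized-pair lists are permutations of each other
lemma a_iff (n : Int) (edges : List (Int × Int × Int)) (cycle : List Int) :
    is_eulerian_cycle n edges cycle = true ↔ (pvEs edges).Perm (pvCs cycle) := by
  unfold is_eulerian_cycle
  by_cases hlen : edges.length ≠ cycle.length
  · rw [if_pos hlen]
    refine iff_of_false (by simp) ?_
    intro hperm
    have h1 : (pvEs edges).length = edges.length := List.length_map ..
    have h2 := pvCs_length cycle
    have h3 := hperm.length_eq
    omega
  · rw [if_neg hlen]
    rw [not_not] at hlen
    by_cases h0 : edges.length = 0
    · rw [if_pos h0]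
      have hedges : edges = [] := List.length_eq_zero_iff.1 h0
      have hcycle : cycle = [] := List.length_eq_zero_iff.1 (by omega)
      subst hedges; subst hcycle
      simp [pvEs, pvCs]
    · rw [if_neg h0]
      rw [eset_eq_counter edges]
      rw [consume_iff _ _ (PySem.Dict.nodup_keys_counter (pvEs edges))]
      rw [show ((cycle.zip (PySem.List.slice cycle (some 1) none ++ PySem.List.slice cycle (some 0) (some 1))).map (fun p => pvNedge p.1 p.2)) = pvCs cycle from rfl]
      rw [List.perm_iff_count]
      constructor
      · intro h k
        have := h k
        rw [PySem.Dict.getD_counter] at this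
        exact_mod_cast this
      · intro h k
        rw [PySem.Dict.getD_counter]
        exact_mod_cast h k

-- ===== VERDICT (by name: the statement is the Claim_ definition above) =====
theorem is_eulerian_cycle_spec : Claim_equal_is_eulerian_cycle := by
  intro n edges cycle _
  unfold Spec_is_eulerian_cycle
  rw [Bool.eq_iff_iff, a_iff, alt_iff]
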